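-- pv_equiv track=rewrite | github.com/PierreMartou/VaMoS2024-ReplicationPackage | CITSAT.py | computeSetCoverScore
-- ===== SOURCE A (Python) =====
-- def computeSetCoverScore(testCase, valuesForFactor, unCovSets):
--     possibleSets = []
--     score = 0
--     factors = list(valuesForFactor.keys())
--     for i1 in range(len(factors)-1):
--         pair1 = (factors[i1], testCase[factors[i1]])
--         for i2 in range(i1+1, len(factors)):
--             pair2 = (factors[i2], testCase[factors[i2]])
--             possibleSets.append([pair1, pair2])
--     for set in possibleSets:
--         if set in unCovSets:
--             score += 1
--     return score
-- ===== SOURCE B (Python) =====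
-- def computeSetCoverScore(testCase, valuesForFactor, unCovSets):
--     pos = {f: i for i, f in enumerate(valuesForFactor)}
--     seen = set()
--     for u in unCovSets:
--         if len(u) == 2:
--             (fa, va), (fb, vb) = u
--             pa = pos.get(fa)
--             pb = pos.get(fb)
--             if pa is not None and pb is not None and pa < pb \
--                and testCase.get(fa) == va and testCase.get(fb) == vb:
--                 seen.add((fa, va, fb, vb))
--     return len(seen)
-- ===== Notes on version B (the rewrite author's own statement) =====
-- stated objective: alternative
-- what changed: Instead of generating all n*(n-1)/2 factor pair-sets and scanning unCovSets for each, B makes one pass over unCovSets, validating each entry against a factor->position dict and the testCase dict and deduplicating qualifying entries in a set (asymptotically cheaper, though not measurable on the generated inputs).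
import Mathlib
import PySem

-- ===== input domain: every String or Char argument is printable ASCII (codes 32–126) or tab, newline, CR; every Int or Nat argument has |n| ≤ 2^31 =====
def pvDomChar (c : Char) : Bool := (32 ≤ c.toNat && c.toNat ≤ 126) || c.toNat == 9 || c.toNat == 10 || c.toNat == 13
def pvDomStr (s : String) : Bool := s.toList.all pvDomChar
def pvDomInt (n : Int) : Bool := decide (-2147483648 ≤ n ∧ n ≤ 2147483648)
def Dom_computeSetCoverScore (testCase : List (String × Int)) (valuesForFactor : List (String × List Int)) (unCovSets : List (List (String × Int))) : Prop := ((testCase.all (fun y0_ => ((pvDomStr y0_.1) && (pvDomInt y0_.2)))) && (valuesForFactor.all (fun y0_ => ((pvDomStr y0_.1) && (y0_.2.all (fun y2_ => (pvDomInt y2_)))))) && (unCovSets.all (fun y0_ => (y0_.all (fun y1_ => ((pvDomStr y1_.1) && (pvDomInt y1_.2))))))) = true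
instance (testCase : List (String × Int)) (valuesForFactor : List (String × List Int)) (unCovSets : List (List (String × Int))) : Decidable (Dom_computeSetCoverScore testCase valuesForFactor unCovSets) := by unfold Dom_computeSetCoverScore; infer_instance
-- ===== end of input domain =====

-- B replaces A's generate-all-pairs-then-scan with a single pass over unCovSets, using a
-- factor→position dict and a dedup set; the equivalence proved is about the return value only.

-- ===== PORT A =====
-- literal transliteration of A: build possibleSets with two nested index loops, then count
-- members of unCovSets (testCase[f] is a dict lookup; total form getD is used, Pre_ guarantees hit)
def computeSetCoverScore (testCase : List (String × Int)) (valuesForFactor : List (String × List Int)) (unCovSets : List (List (String × Int))) : Int :=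
  let factors : List String := PySem.List.dedup (valuesForFactor.map (fun p => p.1))
  let n : Int := (factors.length : Int)
  let possibleSets : List (List (String × Int)) :=
    (PySem.List.pyRange 0 (n - 1) 1).foldl (fun acc i1 =>
      let f1 := PySem.List.pyGetD factors i1 ""
      let pair1 : String × Int := (f1, PySem.Dict.getD (PySem.Dict.mk testCase) f1 0)
      (PySem.List.pyRange (i1 + 1) n 1).foldl (fun acc2 i2 =>
        let f2 := PySem.List.pyGetD factors i2 ""
        let pair2 : String × Int := (f2, PySem.Dict.getD (PySem.Dict.mk testCase) f2 0)
        acc2 ++ [[pair1, pair2]]) acc) []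
  possibleSets.foldl (fun score s => if s ∈ unCovSets then score + 1 else score) 0

-- ===== PORT B =====
-- B-side helpers: the dict {f: i for i, f in enumerate(valuesForFactor)}, the loop's condition, the added tuple
def pvPos (valuesForFactor : List (String × List Int)) : PySem.Dict String Int :=
  (PySem.List.enumerate (PySem.List.dedup (valuesForFactor.map (fun p => p.1))) 0).foldl
    (fun d p => d.insert p.2 p.1) PySem.Dict.empty

def pvCond (tc : PySem.Dict String Int) (pos : PySem.Dict String Int) (u : List (String × Int)) : Bool :=
  match u with
  | [(fa, va), (fb, vb)] =>
      match pos.get? fa, pos.get? fb with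
      | some pa, some pb => decide (pa < pb) && (tc.get? fa == some va) && (tc.get? fb == some vb)
      | _, _ => false
  | _ => false

def pvEnc (u : List (String × Int)) : (String × Int) × (String × Int) :=
  match u with
  | [x, y] => (x, y)
  | _ => (("", 0), ("", 0))

def computeSetCoverScore_alt (testCase : List (String × Int)) (valuesForFactor : List (String × List Int)) (unCovSets : List (List (String × Int))) : Int :=
  let pos := pvPos valuesForFactor
  let tc := PySem.Dict.mk testCase
  let seen : PySem.Set ((String × Int) × (String × Int)) :=
    unCovSets.foldl (fun seen u => if pvCond tc pos u then PySem.Set.add seen (pvEnc u) else seen)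
      PySem.Set.empty
  (PySem.Set.len seen : Int)

-- ===== PRECONDITION & SPEC =====
-- Pre_ excludes exactly the inputs on which A raises KeyError: at least two distinct factors
-- and some factor of valuesForFactor missing from testCase.
def Pre_computeSetCoverScore (testCase : List (String × Int)) (valuesForFactor : List (String × List Int)) (unCovSets : List (List (String × Int))) : Prop :=
  (PySem.List.dedup (valuesForFactor.map (fun p => p.1))).length ≤ 1 ∨
  ∀ p ∈ valuesForFactor, p.1 ∈ testCase.map (fun q => q.1)
instance (testCase : List (String × Int)) (valuesForFactor : List (String × List Int)) (unCovSets : List (List (String × Int))) : Decidable (Pre_computeSetCoverScore testCase valuesForFactor unCovSets) := by unfold Pre_computeSetCoverScore; infer_instance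

def pvWitness_computeSetCoverScore : (List (String × Int)) × (List (String × List Int)) × (List (List (String × Int))) :=
  ([("a", 0), ("b", 1)], [("a", [0]), ("b", [1])], [[("a", 0), ("b", 1)]])

def Spec_computeSetCoverScore (testCase : List (String × Int)) (valuesForFactor : List (String × List Int)) (unCovSets : List (List (String × Int))) (out : Int) : Prop := out = computeSetCoverScore_alt testCase valuesForFactor unCovSets
instance (testCase : List (String × Int)) (valuesForFactor : List (String × List Int)) (unCovSets : List (List (String × Int))) (out : Int) : Decidable (Spec_computeSetCoverScore testCase valuesForFactor unCovSets out) := by unfold Spec_computeSetCoverScore; infer_instance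

-- ===== CLAIM (what is proved, stated in full; the proofs are below) =====
def Claim_equal_computeSetCoverScore : Prop := ∀ (testCase : List (String × Int)) (valuesForFactor : List (String × List Int)) (unCovSets : List (List (String × Int))), Dom_computeSetCoverScore testCase valuesForFactor unCovSets → Pre_computeSetCoverScore testCase valuesForFactor unCovSets → Spec_computeSetCoverScore testCase valuesForFactor unCovSets (computeSetCoverScore testCase valuesForFactor unCovSets)


-- ===== LEMMAS AND PROOFS =====

-- the factor value looked up in testCase (total form, as in port A)
def pvT (tc : List (String × Int)) (f : String) : Int := PySem.Dict.getD (PySem.Dict.mk tc) f 0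

def pvPairN (tc : List (String × Int)) (F : List String) (k : Nat) : String × Int :=
  (F.getD k "", pvT tc (F.getD k ""))

-- the common specification: u is the pair-set of two factors at positions a < b
def pvQ (tc : List (String × Int)) (F : List String) (u : List (String × Int)) : Prop :=
  ∃ a b : Nat, a < b ∧ b < F.length ∧ u = [pvPairN tc F a, pvPairN tc F b]

def pvPoss (tc : List (String × Int)) (F : List String) : List (List (String × Int)) :=
  (PySem.List.pyRange 0 ((F.length : Int) - 1) 1).flatMap (fun i1 =>
    (PySem.List.pyRange (i1 + 1) (F.length : Int) 1).map (fun i2 =>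
      [(PySem.List.pyGetD F i1 "", pvT tc (PySem.List.pyGetD F i1 "")),
       (PySem.List.pyGetD F i2 "", pvT tc (PySem.List.pyGetD F i2 ""))]))

theorem pv_get?_enumFold (F : List String) (d : PySem.Dict String Int) (s : Int) (f : String) (hF : F.Nodup) :
    ((PySem.List.enumerate F s).foldl (fun d p => d.insert p.2 p.1) d).get? f
      = if f ∈ F then some (s + (F.idxOf f : Int)) else d.get? f := by
  induction F generalizing d s with
  | nil => simp [PySem.List.enumerate]
  | cons x rest ih =>
    rw [List.nodup_cons] at hF
    have : PySem.List.enumerate (x :: rest) s = (s, x) :: PySem.List.enumerate rest (s + 1) := by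
      simp [PySem.List.enumerate]
    rw [this, List.foldl_cons, ih _ _ hF.2]
    by_cases hfx : f = x
    · subst hfx
      simp [hF.1, List.idxOf_cons_self, PySem.Dict.get?_insert_self]
    · by_cases hfr : f ∈ rest
      · have hbx : (x == f) = false := beq_false_of_ne (Ne.symm hfx)
        rw [if_pos hfr, if_pos (List.mem_cons_of_mem _ hfr), List.idxOf_cons, hbx]
        simp only [cond_false]
        push_cast
        ring_nf
      · simp [hfr, hfx, PySem.Dict.get?_insert_of_ne (hne := hfx)]

theorem pv_pos_get? (vf : List (String × List Int)) (f : String) :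
    (pvPos vf).get? f =
      if f ∈ PySem.List.dedup (vf.map (fun p => p.1))
      then some ((PySem.List.dedup (vf.map (fun p => p.1))).idxOf f : Int)
      else none := by
  rw [pvPos, pv_get?_enumFold _ _ _ _ (PySem.List.nodup_dedup _)]
  simp [PySem.Dict.get?_empty]

theorem pv_tc_get? (tc : List (String × Int)) (f : String) (h : f ∈ tc.map (fun q => q.1)) :
    (PySem.Dict.mk tc).get? f = some (pvT tc f) := by
  have hk : f ∈ (PySem.Dict.mk tc).keys := by simpa [PySem.Dict.keys] using h
  have : (PySem.Dict.mk tc).get? f ≠ none := fun hn =>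
    ((PySem.Dict.get?_eq_none_iff_not_mem_keys _ _).mp hn) hk
  obtain ⟨v, hv⟩ := Option.ne_none_iff_exists'.mp this
  rw [hv, pvT, PySem.Dict.getD_eq_get?_getD, hv]; rfl

theorem pv_cond_iff (tc : List (String × Int)) (vf : List (String × List Int)) (uc : List (List (String × Int)))
    (hpre : Pre_computeSetCoverScore tc vf uc) (u : List (String × Int)) :
    pvCond (PySem.Dict.mk tc) (pvPos vf) u = true ↔ pvQ tc (PySem.List.dedup (vf.map (fun p => p.1))) u := by
  set F := PySem.List.dedup (vf.map (fun p => p.1)) with hFdef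
  have hF : F.Nodup := hFdef ▸ PySem.List.nodup_dedup _
  constructor
  · intro h
    match u with
    | [(fa, va), (fb, vb)] =>
      rw [pvCond] at h
      rcases hga : (pvPos vf).get? fa with _ | pa
      · rw [hga] at h; simp at h
      rcases hgb : (pvPos vf).get? fb with _ | pb
      · rw [hga, hgb] at h; simp at h
      rw [hga, hgb] at h
      simp only [Bool.and_eq_true, decide_eq_true_eq, beq_iff_eq] at h
      obtain ⟨⟨hlt, hva⟩, hvb⟩ := h
      rw [pv_pos_get? vf fa, ← hFdef] at hga
      rw [pv_pos_get? vf fb, ← hFdef] at hgb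
      by_cases hfa : fa ∈ F
      case neg => rw [if_neg hfa] at hga; cases hga
      by_cases hfb : fb ∈ F
      case neg => rw [if_neg hfb] at hgb; cases hgb
      rw [if_pos hfa] at hga
      rw [if_pos hfb] at hgb
      injection hga with hga; injection hgb with hgb
      have h1 : F.getD (F.idxOf fa) "" = fa := by
        rw [List.getD_eq_getElem F _ (List.idxOf_lt_length_of_mem hfa)]
        exact List.getElem_idxOf _
      have h2 : F.getD (F.idxOf fb) "" = fb := by
        rw [List.getD_eq_getElem F _ (List.idxOf_lt_length_of_mem hfb)]
        exact List.getElem_idxOf _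
      have hva' : pvT tc fa = va := by
        rw [pvT, PySem.Dict.getD_eq_get?_getD, hva]; rfl
      have hvb' : pvT tc fb = vb := by
        rw [pvT, PySem.Dict.getD_eq_get?_getD, hvb]; rfl
      refine ⟨F.idxOf fa, F.idxOf fb, by omega, List.idxOf_lt_length_of_mem hfb, ?_⟩
      rw [pvPairN, pvPairN, h1, h2, hva', hvb']
    | [] => simp [pvCond] at h
    | [x] => simp [pvCond] at h
    | x :: y :: z :: rest => simp [pvCond] at h
  · rintro ⟨a, b, hab, hb, rfl⟩
    have hlen : 2 ≤ F.length := by omega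
    have hall : ∀ p ∈ vf, p.1 ∈ tc.map (fun q => q.1) := by
      rcases hpre with h1 | h2
      · exfalso; rw [← hFdef] at h1; omega
      · exact h2
    have ha : a < F.length := by omega
    have hga : F.getD a "" = F[a] := List.getD_eq_getElem F _ ha
    have hgb : F.getD b "" = F[b] := List.getD_eq_getElem F _ hb
    have hmem : ∀ f ∈ F, f ∈ tc.map (fun q => q.1) := by
      intro f hf
      have hf' : f ∈ vf.map (fun p => p.1) := by
        have hh := hf
        rw [hFdef, PySem.List.mem_dedup] at hh
        exact hh
      obtain ⟨p, hp, hpe⟩ := List.mem_map.mp hf'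
      exact hpe ▸ hall p hp
    rw [pvCond, pvPairN, pvPairN, hga, hgb]
    rw [pv_pos_get?, pv_pos_get?, ← hFdef]
    rw [if_pos (List.getElem_mem _), if_pos (List.getElem_mem _)]
    rw [hF.idxOf_getElem a ha, hF.idxOf_getElem b hb]
    rw [pv_tc_get? tc _ (hmem _ (List.getElem_mem _)), pv_tc_get? tc _ (hmem _ (List.getElem_mem _))]
    simp [hab]

theorem pv_mem_poss (tc : List (String × Int)) (F : List String) (u : List (String × Int)) :
    u ∈ pvPoss tc F ↔ pvQ tc F u := by
  simp only [pvPoss, List.mem_flatMap, List.mem_map, PySem.List.mem_pyRange_one, pvQ, pvPairN]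
  constructor
  · rintro ⟨i1, ⟨h0, h1⟩, x, ⟨⟨h2, h3⟩, rfl⟩⟩
    refine ⟨i1.toNat, x.toNat, by omega, by omega, ?_⟩
    rw [PySem.List.pyGetD_of_nonneg (h := h0), PySem.List.pyGetD_of_nonneg (h := by omega)]
  · rintro ⟨a, b, hab, hb, rfl⟩
    refine ⟨(a : Int), ⟨by omega, by omega⟩, (b : Int), ⟨⟨by omega, by omega⟩, ?_⟩⟩
    rw [PySem.List.pyGetD_natCast, PySem.List.pyGetD_natCast]

theorem pvA_eq_countP (tc : List (String × Int)) (vf : List (String × List Int)) (uc : List (List (String × Int))) :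
    computeSetCoverScore tc vf uc =
      ((pvPoss tc (PySem.List.dedup (vf.map (fun p => p.1)))).countP (fun s => decide (s ∈ uc)) : Int) := by
  unfold computeSetCoverScore pvPoss pvT
  simp only [PySem.List.foldl_append_singleton_eq_map, PySem.List.foldl_append_eq_flatMap,
    List.nil_append, PySem.List.foldl_ite_add_one, zero_add]

theorem pvB_eq (tc : List (String × Int)) (vf : List (String × List Int)) (uc : List (List (String × Int))) :
    computeSetCoverScore_alt tc vf uc =
      ((PySem.List.dedup ((uc.filter (fun u => pvCond (PySem.Dict.mk tc) (pvPos vf) u)).map pvEnc)).length : Int) := by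
  show ((uc.foldl (fun seen u => if pvCond (PySem.Dict.mk tc) (pvPos vf) u then PySem.Set.add seen (pvEnc u) else seen) PySem.Set.empty).len : Int) = _
  rw [PySem.List.foldl_if_eq_foldl_filter, ← PySem.Set.update_map_eq_foldl_add,
    PySem.Set.update_empty]
  simp [PySem.Set.len, PySem.Set.ofList]

theorem pv_getne (F : List String) (hF : F.Nodup) (i j : Int) (h0 : 0 ≤ i) (h1 : i < F.length)
    (h2 : 0 ≤ j) (h3 : j < F.length) (hne : i ≠ j) :
    PySem.List.pyGetD F i "" ≠ PySem.List.pyGetD F j "" := by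
  rw [PySem.List.pyGetD_of_nonneg (h := h0), PySem.List.pyGetD_of_nonneg (h := h2)]
  have hi : i.toNat < F.length := by omega
  have hj : j.toNat < F.length := by omega
  rw [List.getD_eq_getElem F _ hi, List.getD_eq_getElem F _ hj]
  intro he
  have h4 := hF.idxOf_getElem _ hi
  rw [he, hF.idxOf_getElem _ hj] at h4
  omega

theorem pv_nodup_poss (tc : List (String × Int)) (F : List String) (hF : F.Nodup) :
    (pvPoss tc F).Nodup := by
  rw [pvPoss, List.nodup_flatMap]
  constructor
  · intro i1 hi1
    rw [PySem.List.mem_pyRange_one] at hi1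
    refine List.Nodup.map_on ?_ (PySem.List.nodup_pyRange_one _ _)
    intro i2 hi2 i2' hi2' he
    rw [PySem.List.mem_pyRange_one] at hi2 hi2'
    by_contra hne
    simp only [List.cons.injEq, Prod.mk.injEq] at he
    exact pv_getne F hF i2 i2' (by omega) (by omega) (by omega) (by omega) hne he.2.1.1
  · refine List.Pairwise.imp_of_mem ?_ (PySem.List.pairwise_lt_pyRange_one (a := 0) (b := (F.length : Int) - 1))
    intro i1 i1' h1 h1' hlt u hu hu'
    rw [PySem.List.mem_pyRange_one] at h1 h1'
    obtain ⟨i2, hi2, rfl⟩ := List.mem_map.mp hu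
    obtain ⟨i2', hi2', he⟩ := List.mem_map.mp hu'
    simp only [List.cons.injEq, Prod.mk.injEq] at he
    exact pv_getne F hF i1' i1 (by omega) (by omega) (by omega) (by omega) (by omega) he.1.1

theorem pv_count_comm (l m : List (List (String × Int))) (hl : l.Nodup) :
    l.countP (fun s => decide (s ∈ m)) = (PySem.List.dedup (m.filter (fun u => decide (u ∈ l)))).length := by
  rw [List.countP_eq_length_filter]
  rw [← List.toFinset_card_of_nodup (hl.filter _),
      ← List.toFinset_card_of_nodup (PySem.List.nodup_dedup _)]
  congr 1
  ext x
  simp [List.mem_filter, and_comm]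

theorem pv_dedup_map_len (l : List (List (String × Int))) (f : List (String × Int) → (String × Int) × (String × Int))
    (hinj : ∀ x ∈ l, ∀ y ∈ l, f x = f y → x = y) :
    (PySem.List.dedup (l.map f)).length = (PySem.List.dedup l).length := by
  rw [← List.toFinset_card_of_nodup (PySem.List.nodup_dedup _),
      ← List.toFinset_card_of_nodup (PySem.List.nodup_dedup _)]
  have h1 : (PySem.List.dedup (l.map f)).toFinset = l.toFinset.image f := by
    ext x; simp
  have h2 : (PySem.List.dedup l).toFinset = l.toFinset := by
    ext x; simp
  rw [h1, h2,
    Finset.card_image_of_injOn (fun x hx y hy =>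
      hinj x (List.mem_toFinset.mp hx) y (List.mem_toFinset.mp hy))]

-- ===== VERDICT (by name: the statement is the Claim_ definition above) =====
theorem computeSetCoverScore_spec : Claim_equal_computeSetCoverScore := by
  intro tc vf uc _ hpre
  unfold Spec_computeSetCoverScore
  rw [pvA_eq_countP, pvB_eq]
  have hfc : uc.filter (fun u => pvCond (PySem.Dict.mk tc) (pvPos vf) u)
      = uc.filter (fun u => decide (u ∈ pvPoss tc (PySem.List.dedup (vf.map (fun p => p.1))))) :=
    List.filter_congr (fun u _ => by
      rw [Bool.eq_iff_iff, decide_eq_true_iff, pv_cond_iff tc vf uc hpre u, ← pv_mem_poss])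
  have hinj : ∀ x ∈ uc.filter (fun u => pvCond (PySem.Dict.mk tc) (pvPos vf) u),
      ∀ y ∈ uc.filter (fun u => pvCond (PySem.Dict.mk tc) (pvPos vf) u),
      pvEnc x = pvEnc y → x = y := by
    intro x hx y hy he
    rw [hfc] at hx hy
    have hxq := (pv_mem_poss tc _ x).mp (by simpa using (List.mem_filter.mp hx).2)
    have hyq := (pv_mem_poss tc _ y).mp (by simpa using (List.mem_filter.mp hy).2)
    obtain ⟨a, b, -, -, rfl⟩ := hxq
    obtain ⟨c, d, -, -, rfl⟩ := hyq
    simp only [pvEnc, Prod.mk.injEq] at he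
    rw [he.1, he.2]
  have hN : (pvPoss tc (PySem.List.dedup (vf.map (fun p => p.1)))).countP (fun s => decide (s ∈ uc))
      = (PySem.List.dedup ((uc.filter (fun u => pvCond (PySem.Dict.mk tc) (pvPos vf) u)).map pvEnc)).length := by
    rw [pv_dedup_map_len _ _ hinj, hfc,
      pv_count_comm (pvPoss tc (PySem.List.dedup (vf.map (fun p => p.1)))) uc
        (pv_nodup_poss tc _ (PySem.List.nodup_dedup _))]
  exact congrArg (fun n : Nat => (n : Int)) hN
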